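-- pv_equiv track=rewrite | github.com/SergeiShumilin/Coursera_ML | week2_task.py | dictr
-- ===== SOURCE A (Python) =====
-- def dictr(counts):
--     dict = {}
--     i = 0
--     for sublist in counts:
--         for word in sublist:
--             if word not in dict:
--                 dict.update({word:i})
--                 i+=1
--     return dict
-- ===== SOURCE B (Python) =====
-- def dictr(counts):
--     # Rank-by-sorting: dedup via set, then sort the unique words by their
--     # first-occurrence position in the flattened stream and number them.
--     flat = [w for sub in counts for w in sub]
--     words = sorted(set(flat), key=flat.index)
--     return {w: i for i, w in enumerate(words)}
-- ===== Notes on version B (the rewrite author's own statement) =====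
-- stated objective: alternative
-- what changed: B ranks the unique words by sorting set(flat) on each word's first-occurrence position (flat.index) and enumerating the sorted list, instead of A's single pass that increments an inline counter under a membership guard.
import Mathlib
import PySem

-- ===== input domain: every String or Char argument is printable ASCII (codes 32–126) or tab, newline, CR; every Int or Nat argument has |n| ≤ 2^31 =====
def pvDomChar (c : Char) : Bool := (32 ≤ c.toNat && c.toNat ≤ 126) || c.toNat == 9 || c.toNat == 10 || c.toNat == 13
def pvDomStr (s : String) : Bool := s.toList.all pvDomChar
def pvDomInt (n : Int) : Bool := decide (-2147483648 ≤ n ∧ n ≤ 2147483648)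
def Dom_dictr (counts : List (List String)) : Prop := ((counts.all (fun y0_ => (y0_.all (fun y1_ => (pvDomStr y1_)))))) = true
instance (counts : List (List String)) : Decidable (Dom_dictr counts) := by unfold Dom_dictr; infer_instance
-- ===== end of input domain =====

-- B ranks the unique words by sorting them on their first-occurrence position instead of A's inline membership-guarded counter (alternative).

-- ===== PORT A =====
def dictr (counts : List (List String)) : List (String × Int) :=
  (counts.foldl
    (fun (st : PySem.Dict String Int × Int) sublist =>
      sublist.foldl
        (fun st word =>
          if st.1.contains word then st
          else (st.1.insert word st.2, st.2 + 1))
        st)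
    (PySem.Dict.empty, 0)).1.items

-- ===== PORT B =====
def dictr_alt (counts : List (List String)) : List (String × Int) :=
  let flat := counts.flatMap (fun sub => sub)
  -- sorted(set(flat), key=flat.index): flat.index(w) always succeeds (w ∈ flat), so '.getD 0' is never taken;
  -- the key is injective on set(flat), so the sort's result does not depend on the set's iteration order.
  let words := PySem.List.sorted (PySem.Set.ofList flat)
      (fun w => (PySem.List.index? flat w).getD 0) false
  (PySem.List.enumerate words 0).map (fun p => (p.2, p.1))

-- ===== PRECONDITION & SPEC =====
def Spec_dictr (counts : List (List String)) (out : List (String × Int)) : Prop := out = dictr_alt counts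
instance (counts : List (List String)) (out : List (String × Int)) : Decidable (Spec_dictr counts out) := by unfold Spec_dictr; infer_instance

-- ===== CLAIM (what is proved, stated in full; the proofs are below) =====
def Claim_equal_dictr : Prop := ∀ (counts : List (List String)), Dom_dictr counts → Spec_dictr counts (dictr counts)

-- ===== LEMMAS AND PROOFS =====

-- the numbering dict for a list of distinct words
def pvNum (u : List String) : PySem.Dict String Int :=
  PySem.Dict.mk ((PySem.List.enumerate u 0).map (fun p => (p.2, p.1)))

lemma pvNum_keys (u : List String) : (pvNum u).keys = u := by
  simp [pvNum, PySem.Dict.keys, List.map_map, Function.comp_def,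
        PySem.List.map_snd_enumerate]

lemma pvNum_contains (u : List String) (w : String) :
    (pvNum u).contains w = decide (w ∈ u) := by
  rw [PySem.Dict.contains_eq_decide_mem_keys, pvNum_keys]

lemma pvNum_insert (u : List String) (w : String) (h : w ∉ u) :
    (pvNum u).insert w (u.length : Int) = pvNum (u ++ [w]) := by
  apply PySem.Dict.ext
  rw [PySem.Dict.items_insert_of_not_contains _ _ (by simp [pvNum_contains, h])]
  simp [pvNum, PySem.List.enumerate_append, PySem.List.enumerate_cons,
        PySem.List.enumerate_nil]

-- A's word loop on any flat word list, from a numbering state, is the dedup fold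
lemma pv_loop (ws : List String) : ∀ (u : List String),
    ws.foldl
      (fun st word =>
        if st.1.contains word then st
        else (st.1.insert word st.2, st.2 + 1))
      (pvNum u, (u.length : Int))
    = (pvNum (ws.foldl PySem.Set.add u), ((ws.foldl PySem.Set.add u).length : Int)) := by
  induction ws with
  | nil => intro u; rfl
  | cons w ws ih =>
    intro u
    by_cases hw : w ∈ u
    · have hadd : PySem.Set.add u w = u := by simp [PySem.Set.add, hw]
      simp only [List.foldl_cons, pvNum_contains, hw, decide_true, if_true, hadd]
      exact ih u
    · have hadd : PySem.Set.add u w = u ++ [w] := by simp [PySem.Set.add, hw]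
      simp only [List.foldl_cons, pvNum_contains, hw, decide_false, Bool.false_eq_true,
        if_false, hadd]
      rw [pvNum_insert u w hw,
        show ((u.length : Int) + 1) = (((u ++ [w]).length : Int)) by simp]
      exact ih (u ++ [w])

-- the first occurrence of a member lies strictly inside the list
lemma pv_idx_lt (xs : List String) (a : String) (ha : a ∈ xs) :
    (PySem.List.index? xs a).getD 0 < xs.length := by
  obtain ⟨k, hk⟩ := Option.isSome_iff_exists.mp ((PySem.List.index?_isSome_iff xs a).mpr ha)
  obtain ⟨hlt, -, -⟩ := PySem.List.getElem_of_index?_eq_some hk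
  rw [hk]
  simpa using hlt

-- along set(xs) (first-occurrence order) the first-occurrence positions strictly increase
lemma pv_pairwise (xs : List String) :
    (PySem.Set.ofList xs).Pairwise
      (fun a b => (PySem.List.index? xs a).getD 0 < (PySem.List.index? xs b).getD 0) := by
  induction xs using List.reverseRecOn with
  | nil => simp [PySem.Set.ofList]
  | append_singleton xs x ih =>
    rw [PySem.Set.ofList_append_singleton]
    have hpres : ∀ a ∈ PySem.Set.ofList xs,
        PySem.List.index? (xs ++ [x]) a = PySem.List.index? xs a := by
      intro a ha
      exact PySem.List.index?_append_of_mem _ ((PySem.Set.mem_ofList xs a).mp ha)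
    by_cases hx : x ∈ xs
    · rw [PySem.Set.add_of_mem ((PySem.Set.mem_ofList xs x).mpr hx)]
      refine ih.imp_of_mem ?_
      intro a b ha hb h
      rwa [hpres a ha, hpres b hb]
    · rw [PySem.Set.add_of_not_mem (fun h => hx ((PySem.Set.mem_ofList xs x).mp h))]
      rw [List.pairwise_append]
      refine ⟨ih.imp_of_mem (fun {a b} ha hb h => by rwa [hpres a ha, hpres b hb]),
        List.pairwise_singleton _ _, ?_⟩
      intro a ha b hb
      rw [List.mem_singleton] at hb
      rw [hb, hpres a ha, PySem.List.index?_append_singleton_self xs x hx]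
      have := pv_idx_lt xs a ((PySem.Set.mem_ofList xs a).mp ha)
      simpa using this

-- ===== VERDICT (by name: the statement is the Claim_ definition above) =====
theorem dictr_spec : Claim_equal_dictr := by
  intro counts _
  unfold Spec_dictr dictr dictr_alt
  have hflat : counts.foldl
      (fun (st : PySem.Dict String Int × Int) sublist =>
        sublist.foldl
          (fun st word =>
            if st.1.contains word then st
            else (st.1.insert word st.2, st.2 + 1))
          st)
      (PySem.Dict.empty, 0)
      = (counts.flatMap (fun sub => sub)).foldl
          (fun (st : PySem.Dict String Int × Int) word =>
            if st.1.contains word then st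
            else (st.1.insert word st.2, st.2 + 1))
          (PySem.Dict.empty, 0) := by
    rw [List.flatMap_def, List.foldl_flatten]
    simp
  rw [hflat]
  have h0 : ((PySem.Dict.empty : PySem.Dict String Int), (0 : Int))
      = (pvNum [], (([] : List String).length : Int)) := rfl
  rw [h0, pv_loop]
  have hsorted : PySem.List.sorted (PySem.Set.ofList (counts.flatMap (fun sub => sub)))
      (fun w => (PySem.List.index? (counts.flatMap (fun sub => sub)) w).getD 0) false
      = PySem.Set.ofList (counts.flatMap (fun sub => sub)) :=
    PySem.List.sorted_eq_of_perm_of_pairwise_lt _ _ _ (List.Perm.refl _)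
      (pv_pairwise (counts.flatMap (fun sub => sub)))
  simp only [hsorted]
  rfl
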